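-- pv_equiv track=rewrite | github.com/yanhwo/LAB | analysis/TE42.py | get_left_right
-- ===== SOURCE A (Python) =====
-- def get_left_right(lower_rect, center):
--     """
--     将矩形沿着指定中心点旋转90度，返回顺时针和逆时针旋转后的矩形
--
--     参数:
--     rect: 元组 (x1, y1, x2, y2) 表示矩形的左上角和右下角坐标
--     center: 元组 (x0, y0) 表示旋转中心点
--
--     返回:
--     clockwise_rect: 顺时针旋转90度后的矩形 (x1', y1', x2', y2')
--     counterclockwise_rect: 逆时针旋转90度后的矩形 (x1', y1', x2', y2')
--     """
--     x1, y1, x2, y2 = lower_rect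
--     x0, y0 = center
--
--     # 计算矩形的四个角点
--     corners = [
--         (x1, y1),  # 左上
--         (x2, y1),  # 右上
--         (x2, y2),  # 右下
--         (x1, y2)  # 左下
--     ]
--
--     # 顺时针旋转90度 (x', y') = (y0 - y + x0, x - x0 + y0)
--     clockwise_corners = []
--     for x, y in corners:
--         # 将点平移到以旋转中心为原点的坐标系
--         x_shifted = x - x0
--         y_shifted = y - y0
--
--         # 顺时针旋转90度
--         x_rotated = y_shifted
--         y_rotated = -x_shifted
--
--         # 平移回原来的坐标系
--         x_final = x_rotated + x0
--         y_final = y_rotated + y0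
--
--         clockwise_corners.append((x_final, y_final))
--
--     # 逆时针旋转90度 (x', y') = (x0 - y + y0, x - x0 + y0)
--     counterclockwise_corners = []
--     for x, y in corners:
--         # 将点平移到以旋转中心为原点的坐标系
--         x_shifted = x - x0
--         y_shifted = y - y0
--
--         # 逆时针旋转90度
--         x_rotated = -y_shifted
--         y_rotated = x_shifted
--
--         # 平移回原来的坐标系
--         x_final = x_rotated + x0
--         y_final = y_rotated + y0
--
--         counterclockwise_corners.append((x_final, y_final))
--
--     # 计算旋转后矩形的边界框
--     clockwise_x_coords = [p[0] for p in clockwise_corners]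
--     clockwise_y_coords = [p[1] for p in clockwise_corners]
--     clockwise_rect = (
--         min(clockwise_x_coords),
--         min(clockwise_y_coords),
--         max(clockwise_x_coords),
--         max(clockwise_y_coords)
--     )
--
--     counterclockwise_x_coords = [p[0] for p in counterclockwise_corners]
--     counterclockwise_y_coords = [p[1] for p in counterclockwise_corners]
--     counterclockwise_rect = (
--         min(counterclockwise_x_coords),
--         min(counterclockwise_y_coords),
--         max(counterclockwise_x_coords),
--         max(counterclockwise_y_coords)
--     )
--
--     return clockwise_rect, counterclockwise_rect
-- ===== SOURCE B (Python) =====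
-- def get_left_right(lower_rect, center):
--     """Closed-form bounding boxes of the rectangle rotated 90° CW and CCW about center."""
--     x1, y1, x2, y2 = lower_rect
--     x0, y0 = center
--     mnx, mxx = min(x1, x2), max(x1, x2)
--     mny, mxy = min(y1, y2), max(y1, y2)
--     cw = (mny - y0 + x0, x0 - mxx + y0, mxy - y0 + x0, x0 - mnx + y0)
--     ccw = (y0 - mxy + x0, mnx - x0 + y0, y0 - mny + x0, mxx - x0 + y0)
--     return cw, ccw
-- ===== Notes on version B (the rewrite author's own statement) =====
-- stated objective: simpler
-- what changed: Replaced the corner list, the two rotation loops and the four bounding-box min/max scans with direct closed-form formulas from min/max of the rectangle's x- and y-coordinates.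
import Mathlib
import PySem

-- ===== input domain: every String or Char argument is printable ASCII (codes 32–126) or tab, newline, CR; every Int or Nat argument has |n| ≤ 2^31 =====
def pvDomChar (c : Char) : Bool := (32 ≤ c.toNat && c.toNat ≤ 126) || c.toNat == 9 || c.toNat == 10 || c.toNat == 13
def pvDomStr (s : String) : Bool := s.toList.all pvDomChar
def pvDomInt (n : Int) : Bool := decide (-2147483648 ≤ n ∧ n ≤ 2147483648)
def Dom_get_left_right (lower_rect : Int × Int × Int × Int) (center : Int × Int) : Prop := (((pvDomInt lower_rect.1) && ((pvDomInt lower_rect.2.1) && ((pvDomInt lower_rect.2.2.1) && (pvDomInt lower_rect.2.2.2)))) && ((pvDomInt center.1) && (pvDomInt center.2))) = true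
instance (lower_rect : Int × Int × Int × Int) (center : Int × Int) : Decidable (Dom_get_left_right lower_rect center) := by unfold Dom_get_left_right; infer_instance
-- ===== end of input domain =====

-- B replaces A's two corner-rotation loops and bounding-box scans with direct closed-form
-- min/max formulas (objective: simpler); return values are proved identical on all inputs.

-- ===== PORT A =====
-- literal port: corner list, two rotation loops accumulating lists, then min/max of the
-- coordinate lists (the lists are 4-element literals, so min?/max? are always some; getD 0
-- is never the default)
def get_left_right (lower_rect : Int × Int × Int × Int) (center : Int × Int) : (Int × Int × Int × Int) × (Int × Int × Int × Int) :=
  let (x1, y1, x2, y2) := lower_rect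
  let (x0, y0) := center
  let corners : List (Int × Int) := [(x1, y1), (x2, y1), (x2, y2), (x1, y2)]
  let clockwise_corners := corners.foldl (fun acc p =>
    let (x, y) := p
    let x_shifted := x - x0
    let y_shifted := y - y0
    let x_rotated := y_shifted
    let y_rotated := -x_shifted
    let x_final := x_rotated + x0
    let y_final := y_rotated + y0
    acc ++ [(x_final, y_final)]) []
  let counterclockwise_corners := corners.foldl (fun acc p =>
    let (x, y) := p
    let x_shifted := x - x0
    let y_shifted := y - y0
    let x_rotated := -y_shifted
    let y_rotated := x_shifted
    let x_final := x_rotated + x0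
    let y_final := y_rotated + y0
    acc ++ [(x_final, y_final)]) []
  let cw_x := clockwise_corners.map (fun p => p.1)
  let cw_y := clockwise_corners.map (fun p => p.2)
  let clockwise_rect := ((PySem.List.min? cw_x (fun v => v)).getD 0,
                         (PySem.List.min? cw_y (fun v => v)).getD 0,
                         (PySem.List.max? cw_x (fun v => v)).getD 0,
                         (PySem.List.max? cw_y (fun v => v)).getD 0)
  let ccw_x := counterclockwise_corners.map (fun p => p.1)
  let ccw_y := counterclockwise_corners.map (fun p => p.2)
  let counterclockwise_rect := ((PySem.List.min? ccw_x (fun v => v)).getD 0,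
                                (PySem.List.min? ccw_y (fun v => v)).getD 0,
                                (PySem.List.max? ccw_x (fun v => v)).getD 0,
                                (PySem.List.max? ccw_y (fun v => v)).getD 0)
  (clockwise_rect, counterclockwise_rect)

-- ===== PORT B =====
def get_left_right_alt (lower_rect : Int × Int × Int × Int) (center : Int × Int) : (Int × Int × Int × Int) × (Int × Int × Int × Int) :=
  let (x1, y1, x2, y2) := lower_rect
  let (x0, y0) := center
  let mnx := min x1 x2
  let mxx := max x1 x2
  let mny := min y1 y2
  let mxy := max y1 y2
  let cw := (mny - y0 + x0, x0 - mxx + y0, mxy - y0 + x0, x0 - mnx + y0)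
  let ccw := (y0 - mxy + x0, mnx - x0 + y0, y0 - mny + x0, mxx - x0 + y0)
  (cw, ccw)

-- ===== PRECONDITION & SPEC =====
def Spec_get_left_right (lower_rect : Int × Int × Int × Int) (center : Int × Int) (out : (Int × Int × Int × Int) × (Int × Int × Int × Int)) : Prop := out = get_left_right_alt lower_rect center
instance (lower_rect : Int × Int × Int × Int) (center : Int × Int) (out : (Int × Int × Int × Int) × (Int × Int × Int × Int)) : Decidable (Spec_get_left_right lower_rect center out) := by unfold Spec_get_left_right; infer_instance

-- ===== CLAIM (what is proved, stated in full; the proofs are below) =====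
def Claim_equal_get_left_right : Prop := ∀ (lower_rect : Int × Int × Int × Int) (center : Int × Int), Dom_get_left_right lower_rect center → Spec_get_left_right lower_rect center (get_left_right lower_rect center)

-- ===== LEMMAS AND PROOFS =====

-- ===== VERDICT (by name: the statement is the Claim_ definition above) =====
theorem get_left_right_spec : Claim_equal_get_left_right := by
  rintro ⟨x1, y1, x2, y2⟩ ⟨x0, y0⟩ _
  unfold Spec_get_left_right get_left_right get_left_right_alt
  simp [PySem.List.min?_id_cons, PySem.List.max?_id_cons, List.foldl]
  omega
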